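-- pv_equiv track=rewrite | github.com/IuriiPosidielov/Assistant | utils/text.py | nearestDelimiter
-- ===== SOURCE A (Python) =====
-- def nearestDelimiter(txt,  cur):
--     try:
--         delimiters = ".!?"
--         if(txt[cur] in delimiters) :
--             return cur
--         else:
--             i=cur
--             while ( i>=0 ):
--                 if (txt[i] in delimiters) :
--                             return i
--                 i=i-1
--         return 0
--     except Exception as e:
--          return 0
-- ===== SOURCE B (Python) =====
-- def nearestDelimiter(txt, cur):
--     try:
--         if txt[cur] in ".!?":
--             return cur
--     except Exception:
--         return 0
--     if cur < 0:
--         return 0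
--     pos = max(txt.rfind(d, 0, cur + 1) for d in ".!?")
--     return max(pos, 0)
-- ===== Notes on version B (the rewrite author's own statement) =====
-- stated objective: idiomatic
-- what changed: The manual backward char-by-char while loop is replaced by three library rfind searches (one per delimiter) over the prefix txt[0:cur+1], combined with max.
import Mathlib
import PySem

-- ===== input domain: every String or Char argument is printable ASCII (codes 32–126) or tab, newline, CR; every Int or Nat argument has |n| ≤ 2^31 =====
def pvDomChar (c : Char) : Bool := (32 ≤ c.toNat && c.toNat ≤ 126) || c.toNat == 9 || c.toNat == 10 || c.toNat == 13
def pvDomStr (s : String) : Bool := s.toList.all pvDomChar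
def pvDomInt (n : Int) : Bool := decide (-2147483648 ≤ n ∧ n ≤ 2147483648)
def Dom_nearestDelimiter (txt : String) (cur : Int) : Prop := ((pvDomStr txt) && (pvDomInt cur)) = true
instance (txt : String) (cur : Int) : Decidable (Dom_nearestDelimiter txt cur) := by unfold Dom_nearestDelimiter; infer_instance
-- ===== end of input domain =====

-- B replaces A's manual backward membership scan with three rfind searches on txt[0:cur+1] combined by max (idiomatic; same behaviour, including on negative / out-of-range cur).

-- ===== PORT A =====
-- c in ".!?"
def isDelimA (c : Char) : Bool := c = '.' || c = '!' || c = '?'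

-- the while loop: i from cur down while i ≥ 0; txt[i] as getD (exact here: in A the loop
-- only runs with 0 ≤ i ≤ cur < len, since txt[cur] succeeded with cur ≥ 0)
def loopA (cs : List Char) (i : Int) : Int :=
  if 0 ≤ i then
    if isDelimA (cs.getD i.toNat ' ') then i
    else loopA cs (i - 1)
  else 0
termination_by (i + 1).toNat
decreasing_by omega

def nearestDelimiter (txt : String) (cur : Int) : Int :=
  match PySem.Str.pyGet? txt cur with   -- txt[cur]; none = IndexError, caught → 0
  | none => 0
  | some c => if isDelimA c then cur else loopA txt.toList cur

-- ===== PORT B =====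
def isDelimB (c : Char) : Bool := c = '.' || c = '!' || c = '?'

-- txt.rfind(d, 0, e) for a single character d with 0 ≤ e ≤ len txt (the only way B calls it):
-- highest index i < e with txt[i] = d, else -1 — exact on these bounds
def rfindCharTo (cs : List Char) (d : Char) (e : Nat) : Int :=
  match e with
  | 0 => -1
  | m + 1 => if cs.getD m ' ' = d then (m : Int) else rfindCharTo cs d m

def nearestDelimiter_alt (txt : String) (cur : Int) : Int :=
  match PySem.Str.pyGet? txt cur with   -- txt[cur]; none = IndexError, caught → 0
  | none => 0
  | some c =>
    if isDelimB c then cur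
    else if cur < 0 then 0
    else
      let e := cur.toNat + 1
      let pos := max (rfindCharTo txt.toList '.' e)
                     (max (rfindCharTo txt.toList '!' e) (rfindCharTo txt.toList '?' e))
      max pos 0

-- ===== PRECONDITION & SPEC =====
def Spec_nearestDelimiter (txt : String) (cur : Int) (out : Int) : Prop := out = nearestDelimiter_alt txt cur
instance (txt : String) (cur : Int) (out : Int) : Decidable (Spec_nearestDelimiter txt cur out) := by unfold Spec_nearestDelimiter; infer_instance

-- ===== CLAIM (what is proved, stated in full; the proofs are below) =====
def Claim_equal_nearestDelimiter : Prop := ∀ (txt : String) (cur : Int), Dom_nearestDelimiter txt cur → Spec_nearestDelimiter txt cur (nearestDelimiter txt cur)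

-- ===== LEMMAS AND PROOFS =====

theorem rfindCharTo_lt (cs : List Char) (d : Char) (e : Nat) :
    -1 ≤ rfindCharTo cs d e ∧ rfindCharTo cs d e < (e : Int) := by
  induction e with
  | zero => simp [rfindCharTo]
  | succ m ih =>
    simp only [rfindCharTo]
    split <;> omega

theorem rfindCharTo_succ (cs : List Char) (d : Char) (k : Nat) :
    rfindCharTo cs d (k + 1) = if cs.getD k ' ' = d then ((k : Nat) : Int) else rfindCharTo cs d k := rfl

theorem loopA_step (cs : List Char) (k : Nat) :
    loopA cs ((k : Nat) : Int) =
      if isDelimA (cs.getD k ' ') then ((k : Nat) : Int) else loopA cs (((k : Nat) : Int) - 1) := by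
  rw [loopA, if_pos (by positivity : (0 : Int) ≤ ((k : Nat) : Int))]
  norm_num

theorem loopA_eq_rfind (cs : List Char) (n : Nat) :
    loopA cs (n : Int) =
      max (max (rfindCharTo cs '.' (n + 1))
               (max (rfindCharTo cs '!' (n + 1)) (rfindCharTo cs '?' (n + 1)))) 0 := by
  induction n with
  | zero =>
    rw [loopA_step, rfindCharTo_succ, rfindCharTo_succ, rfindCharTo_succ]
    by_cases hd : cs.getD 0 ' ' = '.'
    · rw [if_pos (show isDelimA (cs.getD 0 ' ') = true by rw [hd]; decide),
          if_pos hd, if_neg (by rw [hd]; decide), if_neg (by rw [hd]; decide)]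
      simp [rfindCharTo]
    · by_cases he : cs.getD 0 ' ' = '!'
      · rw [if_pos (show isDelimA (cs.getD 0 ' ') = true by rw [he]; decide),
            if_neg hd, if_pos he, if_neg (by rw [he]; decide)]
        simp [rfindCharTo]
      · by_cases hf : cs.getD 0 ' ' = '?'
        · rw [if_pos (show isDelimA (cs.getD 0 ' ') = true by rw [hf]; decide),
              if_neg hd, if_neg he, if_pos hf]
          simp [rfindCharTo]
        · rw [if_neg (show ¬ isDelimA (cs.getD 0 ' ') = true by
                simp only [isDelimA, Bool.or_eq_true, decide_eq_true_eq, not_or]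
                exact ⟨⟨hd, he⟩, hf⟩),
              if_neg hd, if_neg he, if_neg hf]
          rw [loopA]
          norm_num [rfindCharTo]
  | succ m ih =>
    rw [loopA_step cs (m + 1),
        (show (((m + 1 : Nat) : Int)) - 1 = ((m : Nat) : Int) by push_cast; ring), ih,
        rfindCharTo_succ cs '.' (m + 1), rfindCharTo_succ cs '!' (m + 1),
        rfindCharTo_succ cs '?' (m + 1)]
    have h1 := rfindCharTo_lt cs '.' (m + 1)
    have h2 := rfindCharTo_lt cs '!' (m + 1)
    have h3 := rfindCharTo_lt cs '?' (m + 1)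
    by_cases hd : cs.getD (m + 1) ' ' = '.'
    · rw [if_pos (show isDelimA (cs.getD (m + 1) ' ') = true by rw [hd]; decide),
          if_pos hd, if_neg (by rw [hd]; decide), if_neg (by rw [hd]; decide)]
      omega
    · by_cases he : cs.getD (m + 1) ' ' = '!'
      · rw [if_pos (show isDelimA (cs.getD (m + 1) ' ') = true by rw [he]; decide),
            if_neg hd, if_pos he, if_neg (by rw [he]; decide)]
        omega
      · by_cases hf : cs.getD (m + 1) ' ' = '?'
        · rw [if_pos (show isDelimA (cs.getD (m + 1) ' ') = true by rw [hf]; decide),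
              if_neg hd, if_neg he, if_pos hf]
          omega
        · rw [if_neg (show ¬ isDelimA (cs.getD (m + 1) ' ') = true by
                simp only [isDelimA, Bool.or_eq_true, decide_eq_true_eq, not_or]
                exact ⟨⟨hd, he⟩, hf⟩),
              if_neg hd, if_neg he, if_neg hf]

-- ===== VERDICT (by name: the statement is the Claim_ definition above) =====
theorem nearestDelimiter_spec : Claim_equal_nearestDelimiter := by
  intro txt cur _
  unfold Spec_nearestDelimiter nearestDelimiter nearestDelimiter_alt
  cases h : PySem.Str.pyGet? txt cur with
  | none => rfl
  | some c =>
    show (if isDelimA c = true then cur else loopA txt.toList cur) =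
      (if isDelimB c = true then cur
       else if cur < 0 then 0
       else max (max (rfindCharTo txt.toList '.' (cur.toNat + 1))
                  (max (rfindCharTo txt.toList '!' (cur.toNat + 1))
                       (rfindCharTo txt.toList '?' (cur.toNat + 1)))) 0)
    by_cases hc : isDelimA c = true
    · rw [if_pos hc, if_pos (show isDelimB c = true from hc)]
    · rw [if_neg hc, if_neg (show ¬ isDelimB c = true from hc)]
      by_cases hneg : cur < 0
      · rw [if_pos hneg, loopA, if_neg (by omega : ¬ (0 : Int) ≤ cur)]
      · rw [if_neg hneg]
        have hcur : cur = ((cur.toNat : Nat) : Int) := by omega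
        rw [hcur]
        exact loopA_eq_rfind txt.toList cur.toNat
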